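-- pv_equiv track=rewrite | github.com/sepandhaghighi/verilogparser | Verilog/Verilog.py | moduleExtractor
-- ===== SOURCE A (Python) =====
-- def moduleExtractor(splitData):
--
--     moduleSection=[]
--     inputSection=[]
--     wireSection=[]
--     outputSection=[]
--     for item in splitData:
--         if (item.find("module")!=-1) and (item.find("endmodule")==-1):
--             index_1 = item.find("(")
--             index_2 = item.find(")")
--             moduleSection=list(map(str.strip,item[index_1+1:index_2].replace("\n","").split(",")))
--         if item.find("input")!=-1:
--             index_1 = item.find(" ")
--             inputSection=list(map(str.strip,item[index_1+1:].replace("\n","").split(",")))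
--         if item.find('wire')!=-1:
--             index_1 = item.find(" ")
--             wireSection = list(map(str.strip, item[index_1+1:].replace("\n", "").split(",")))
--         if item.find('output')!=-1:
--             index_1 = item.find(" ")
--             outputSection = list(map(str.strip, item[index_1+1:].replace("\n", "").split(",")))
--
--
--     return (moduleSection,inputSection,wireSection,outputSection)
-- ===== SOURCE B (Python) =====
-- def _last(splitData, pred):
--     for item in reversed(splitData):
--         if pred(item):
--             return item
--     return None
--
-- def _parse_tail(item):
--     return [s.strip() for s in item[item.find(" ")+1:].replace("\n", "").split(",")]
--
-- def _section(splitData, keyword):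
--     item = _last(splitData, lambda x: keyword in x)
--     return _parse_tail(item) if item is not None else []
--
-- def moduleExtractor(splitData):
--     m = _last(splitData, lambda x: "module" in x and "endmodule" not in x)
--     if m is not None:
--         moduleSection = [s.strip() for s in m[m.find("(")+1:m.find(")")].replace("\n", "").split(",")]
--     else:
--         moduleSection = []
--     return (moduleSection,
--             _section(splitData, "input"),
--             _section(splitData, "wire"),
--             _section(splitData, "output"))
-- ===== Notes on version B (the rewrite author's own statement) =====
-- stated objective: simpler
-- what changed: Replaces A's single pass that keeps and overwrites four accumulators with one last-match helper scanned from the end of the list, called once per section keyword, plus a separate module scan.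
import Mathlib
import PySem

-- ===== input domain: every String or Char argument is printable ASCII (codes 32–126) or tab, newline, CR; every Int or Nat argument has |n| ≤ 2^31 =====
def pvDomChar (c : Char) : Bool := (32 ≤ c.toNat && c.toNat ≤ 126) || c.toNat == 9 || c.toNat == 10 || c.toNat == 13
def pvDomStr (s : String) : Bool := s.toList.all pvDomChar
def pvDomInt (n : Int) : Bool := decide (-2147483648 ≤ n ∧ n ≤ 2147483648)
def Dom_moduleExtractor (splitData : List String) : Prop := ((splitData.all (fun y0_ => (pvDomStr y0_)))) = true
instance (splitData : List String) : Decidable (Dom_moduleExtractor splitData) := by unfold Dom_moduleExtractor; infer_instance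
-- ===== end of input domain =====

-- B replaces A's single accumulating pass with targeted last-match scans per keyword (objective: simpler decomposition).


-- ===== PORT A =====
-- A's loop body: four independent ifs, each overwriting its section on a match.
-- s.split(",") is (PySem.Str.split? s ",").getD []: the separator is non-empty, so split? is always `some` (getD never takes the default).
def pvStepA (s : List String × List String × List String × List String) (item : String) :
    List String × List String × List String × List String :=
  match s with
  | (m, inp, w, o) =>
    let m := if PySem.Str.find item "module" ≠ -1 ∧ PySem.Str.find item "endmodule" = -1 then
        let i1 := PySem.Str.find item "("
        let i2 := PySem.Str.find item ")"
        ((PySem.Str.split? (PySem.Str.replace (PySem.Str.slice item (some (i1 + 1)) (some i2)) "\n" "") ",").getD []).map PySem.Str.strip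
      else m
    let inp := if PySem.Str.find item "input" ≠ -1 then
        let i1 := PySem.Str.find item " "
        ((PySem.Str.split? (PySem.Str.replace (PySem.Str.slice item (some (i1 + 1)) none) "\n" "") ",").getD []).map PySem.Str.strip
      else inp
    let w := if PySem.Str.find item "wire" ≠ -1 then
        let i1 := PySem.Str.find item " "
        ((PySem.Str.split? (PySem.Str.replace (PySem.Str.slice item (some (i1 + 1)) none) "\n" "") ",").getD []).map PySem.Str.strip
      else w
    let o := if PySem.Str.find item "output" ≠ -1 then
        let i1 := PySem.Str.find item " "
        ((PySem.Str.split? (PySem.Str.replace (PySem.Str.slice item (some (i1 + 1)) none) "\n" "") ",").getD []).map PySem.Str.strip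
      else o
    (m, inp, w, o)

def moduleExtractor (splitData : List String) : List String × List String × List String × List String :=
  splitData.foldl pvStepA ([], [], [], [])

-- ===== PORT B =====
-- last item of splitData satisfying pred (scanning from the end), as in Source B's _last
def pvLast (splitData : List String) (pred : String → Bool) : Option String :=
  splitData.reverse.find? pred

def pvParseTail (item : String) : List String :=
  ((PySem.Str.split? (PySem.Str.replace (PySem.Str.slice item (some (PySem.Str.find item " " + 1)) none) "\n" "") ",").getD []).map PySem.Str.strip

def pvSection (splitData : List String) (keyword : String) : List String :=
  match pvLast splitData (fun x => PySem.Str.isIn keyword x) with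
  | some item => pvParseTail item
  | none => []

def moduleExtractor_alt (splitData : List String) : List String × List String × List String × List String :=
  let moduleSection :=
    match pvLast splitData (fun x => PySem.Str.isIn "module" x && !PySem.Str.isIn "endmodule" x) with
    | some m =>
        ((PySem.Str.split? (PySem.Str.replace (PySem.Str.slice m (some (PySem.Str.find m "(" + 1)) (some (PySem.Str.find m ")"))) "\n" "") ",").getD []).map PySem.Str.strip
    | none => []
  (moduleSection, pvSection splitData "input", pvSection splitData "wire", pvSection splitData "output")

-- ===== PRECONDITION & SPEC =====
def Spec_moduleExtractor (splitData : List String) (out : List String × List String × List String × List String) : Prop := out = moduleExtractor_alt splitData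
instance (splitData : List String) (out : List String × List String × List String × List String) : Decidable (Spec_moduleExtractor splitData out) := by unfold Spec_moduleExtractor; infer_instance

-- ===== CLAIM (what is proved, stated in full; the proofs are below) =====
def Claim_equal_moduleExtractor : Prop := ∀ (splitData : List String), Dom_moduleExtractor splitData → Spec_moduleExtractor splitData (moduleExtractor splitData)

-- ===== LEMMAS AND PROOFS =====

-- A's test 'item.find(sub) != -1' coincides with B's test 'sub in item'
theorem pv_cond_one (item sub : String) :
    (PySem.Str.find item sub ≠ -1) ↔ (PySem.Str.isIn sub item = true) := by
  rw [PySem.Str.find_ne_neg_one_iff, PySem.Str.isIn_iff_infix]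

-- and 'item.find(sub) == -1' with 'sub not in item'
theorem pv_cond_zero (item sub : String) :
    (PySem.Str.find item sub = -1) ↔ (PySem.Str.isIn sub item = false) := by
  rw [PySem.Str.find_eq_neg_one_iff, ← Bool.not_eq_true, PySem.Str.isIn_iff_infix]

theorem pvLast_append (l : List String) (x : String) (p : String → Bool) :
    pvLast (l ++ [x]) p = if p x then some x else pvLast l p := by
  simp only [pvLast, List.reverse_append, List.reverse_singleton, List.singleton_append,
    List.find?]
  cases p x <;> simp

theorem pvSection_append (l : List String) (x : String) (kw : String) :
    pvSection (l ++ [x]) kw =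
      if PySem.Str.isIn kw x then pvParseTail x else pvSection l kw := by
  unfold pvSection
  rw [pvLast_append]
  cases PySem.Str.isIn kw x <;> simp

theorem pv_main (splitData : List String) :
    moduleExtractor splitData = moduleExtractor_alt splitData := by
  induction splitData using List.reverseRecOn with
  | nil => rfl
  | append_singleton l x ih =>
    unfold moduleExtractor at *
    rw [List.foldl_append, List.foldl_cons, List.foldl_nil, ih]
    show pvStepA (moduleExtractor_alt l) x = moduleExtractor_alt (l ++ [x])
    conv_rhs => rw [moduleExtractor_alt]
    rw [pvLast_append]
    simp only [pvSection_append]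
    rw [moduleExtractor_alt]
    show pvStepA (_, _, _, _) x = _
    unfold pvStepA
    simp only [pv_cond_one, pv_cond_zero]
    cases hm : PySem.Str.isIn "module" x <;>
      cases he : PySem.Str.isIn "endmodule" x <;>
      cases hi : PySem.Str.isIn "input" x <;>
      cases hw : PySem.Str.isIn "wire" x <;>
      cases ho : PySem.Str.isIn "output" x <;>
      simp_all [pvParseTail]

-- ===== VERDICT (by name: the statement is the Claim_ definition above) =====
theorem moduleExtractor_spec : Claim_equal_moduleExtractor := by
  intro splitData _
  exact pv_main splitData
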